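-- pv_equiv track=rewrite | github.com/naufalbasara/python-algorithm-exercise | hackerrank/main.py | leftInspect
-- ===== SOURCE A (Python) =====
-- def leftInspect(length, segments, taken):
--     if len(segments) != length:
--         return 0
--     else:
--         best = 0
--         index = 0
--         for i in range(len(segments)-taken):
--             if best<=sum(segments[i:i+taken]):
--                 index = i
--             else:
--                 continue
--         return index
-- ===== SOURCE B (Python) =====
-- def leftInspect(length, segments, taken):
--     if len(segments) != length:
--         return 0
--     prefix = [0]
--     for x in segments:
--         prefix.append(prefix[-1] + x)
--     index = 0
--     for i in range(len(segments) - taken):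
--         if prefix[i + taken] >= prefix[i]:
--             index = i
--     return index
-- ===== Notes on version B (the rewrite author's own statement) =====
-- stated objective: alternative
-- what changed: Builds a prefix-sum array once and compares two prefix entries per window instead of re-summing the slice segments[i:i+taken] at every loop step; Pre_ excludes negative taken (a negative window size, outside the task's natural domain) when the length check passes: there A's windows come from negative-index slice wraparound and B's natural indexing raises or differs.
-- outside the precondition, e.g. on leftInspect(3, [1, -2, 3], -1): A returns 3, B returns 2; on leftInspect(3, [1, -2, 3], -2): A returns 4, B raises IndexError
import Mathlib
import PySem

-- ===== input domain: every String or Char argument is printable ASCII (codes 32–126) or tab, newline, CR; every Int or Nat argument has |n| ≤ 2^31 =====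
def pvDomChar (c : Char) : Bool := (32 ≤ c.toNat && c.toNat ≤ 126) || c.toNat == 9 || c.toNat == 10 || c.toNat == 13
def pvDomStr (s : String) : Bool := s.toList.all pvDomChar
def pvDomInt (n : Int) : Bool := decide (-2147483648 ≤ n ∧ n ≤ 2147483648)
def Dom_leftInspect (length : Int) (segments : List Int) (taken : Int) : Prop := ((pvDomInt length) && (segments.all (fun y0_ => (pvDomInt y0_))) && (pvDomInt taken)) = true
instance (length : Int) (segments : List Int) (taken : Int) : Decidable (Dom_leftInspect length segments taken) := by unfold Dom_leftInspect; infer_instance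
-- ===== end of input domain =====

-- B builds a prefix-sum array once and compares two prefix entries per window instead of re-summing each slice;
-- Pre_ restricts to nonnegative window size taken (the task's natural domain) unless the length check fails.


-- ===== PORT A =====
def leftInspect (length : Int) (segments : List Int) (taken : Int) : Int :=
  if (segments.length : Int) ≠ length then 0
  else
    ((PySem.List.pyRange 0 ((segments.length : Int) - taken) 1).foldl
      (fun (st : Int × Int) i =>
        if st.1 ≤ (PySem.List.slice segments (some i) (some (i + taken))).sum
        then (st.1, i) else st)
      (0, 0)).2

-- ===== PORT B =====
-- prefix[i+taken] / prefix[i]: plain Python indexing; inside Pre_ both indices are in range,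
-- so pyGetD (Python indexing with a default) is exact there.
def leftInspect_alt (length : Int) (segments : List Int) (taken : Int) : Int :=
  if (segments.length : Int) ≠ length then 0
  else
    let pr := (segments.foldl (fun (st : List Int × Int) x =>
        (st.1 ++ [st.2 + x], st.2 + x)) ([0], 0)).1
    (PySem.List.pyRange 0 ((segments.length : Int) - taken) 1).foldl
      (fun idx i =>
        if PySem.List.pyGetD pr i 0 ≤ PySem.List.pyGetD pr (i + taken) 0
        then i else idx) 0

-- ===== PRECONDITION & SPEC =====
-- Pre_ excludes negative taken when the length check passes: a negative window size is outside the task's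
-- natural domain — there A's value comes from negative-index slice wraparound while B's natural indexing
-- raises or differs; on a length mismatch both return 0 at once, so those inputs stay admitted.
def Pre_leftInspect (length : Int) (segments : List Int) (taken : Int) : Prop := 0 ≤ taken ∨ (segments.length : Int) ≠ length
instance (length : Int) (segments : List Int) (taken : Int) : Decidable (Pre_leftInspect length segments taken) := by unfold Pre_leftInspect; infer_instance
def pvWitness_leftInspect : Int × List Int × Int := (3, [1, -2, 3], 2)
def Spec_leftInspect (length : Int) (segments : List Int) (taken : Int) (out : Int) : Prop := out = leftInspect_alt length segments taken
instance (length : Int) (segments : List Int) (taken : Int) (out : Int) : Decidable (Spec_leftInspect length segments taken out) := by unfold Spec_leftInspect; infer_instance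

-- ===== CLAIM (what is proved, stated in full; the proofs are below) =====
def Claim_equal_leftInspect : Prop := ∀ (length : Int) (segments : List Int) (taken : Int), Dom_leftInspect length segments taken → Pre_leftInspect length segments taken → Spec_leftInspect length segments taken (leftInspect length segments taken)

-- ===== LEMMAS AND PROOFS =====

-- the prefix list B builds is the list of prefix sums
theorem prefix_fst (xs : List Int) (p : List Int) (t : Int) :
    (xs.foldl (fun (st : List Int × Int) x => (st.1 ++ [st.2 + x], st.2 + x)) (p, t)).1
      = p ++ (List.range xs.length).map (fun k => t + (xs.take (k+1)).sum) := by
  induction xs generalizing p t with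
  | nil => simp
  | cons x xs ih =>
    simp only [List.foldl_cons, ih, List.length_cons, List.range_succ_eq_map,
      List.map_cons, List.map_map]
    simp [List.append_assoc, Function.comp, add_assoc]

theorem prefix_getD (xs : List Int) (k : Nat) (hk : k ≤ xs.length) :
    (List.getD ((xs.foldl (fun (st : List Int × Int) x =>
        (st.1 ++ [st.2 + x], st.2 + x)) ([0], 0)).1) k 0) = (xs.take k).sum := by
  rw [prefix_fst]
  cases k with
  | zero => simp
  | succ k =>
    have hk' : k < xs.length := by omega
    rw [List.getD_eq_getElem?_getD]
    simp [hk']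

-- window sum as a difference of prefix sums
theorem window_sum (xs : List Int) (a t : Nat) :
    ((xs.drop a).take t).sum = (xs.take (a + t)).sum - (xs.take a).sum := by
  have h2 : xs.take (a + t) = xs.take a ++ (xs.drop a).take t := List.take_add
  rw [h2, List.sum_append]; ring

-- A's pair-state loop equals B's index-only loop when the tested conditions agree
theorem loop_eq (l : List Int) (S : Int → Int) (C : Int → Prop) [DecidablePred C]
    (h : ∀ i ∈ l, (0 ≤ S i ↔ C i)) (idx0 : Int) :
    ((l.foldl (fun (st : Int × Int) i => if st.1 ≤ S i then (st.1, i) else st) ((0:Int), idx0)).2)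
      = l.foldl (fun idx i => if C i then i else idx) idx0 := by
  induction l generalizing idx0 with
  | nil => rfl
  | cons i l ih =>
    have hS := h i (List.mem_cons_self ..)
    have h' : ∀ j ∈ l, (0 ≤ S j ↔ C j) := fun j hj => h j (List.mem_cons_of_mem _ hj)
    simp only [List.foldl_cons]
    by_cases hc : C i
    · rw [if_pos (hS.mpr hc), if_pos hc]; exact ih h' i
    · rw [if_neg (fun hle => hc (hS.mp hle)), if_neg hc]; exact ih h' idx0

-- ===== VERDICT (by name: the statement is the Claim_ definition above) =====
theorem leftInspect_spec : Claim_equal_leftInspect := by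
  intro length segments taken _ hpre
  unfold Spec_leftInspect leftInspect leftInspect_alt
  by_cases hlen : (segments.length : Int) ≠ length
  · simp [hlen]
  · have htaken : 0 ≤ taken := hpre.resolve_right (by tauto)
    simp only [if_neg hlen]
    apply loop_eq
    intro i hi
    rw [PySem.List.mem_pyRange_one] at hi
    obtain ⟨hi0, hiu⟩ := hi
    obtain ⟨a, rfl⟩ := Int.eq_ofNat_of_zero_le hi0
    obtain ⟨t, rfl⟩ := Int.eq_ofNat_of_zero_le htaken
    have han : a + t ≤ segments.length := by
      have := hiu; push_cast at this ⊢; omega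
    rw [show ((a : Int) + (t : Int)) = ((a + t : Nat) : Int) by push_cast; ring]
    rw [PySem.List.slice_natCast, PySem.List.pyGetD_natCast, PySem.List.pyGetD_natCast]
    rw [show a + t - a = t by omega]
    rw [prefix_getD segments a (by omega), prefix_getD segments (a + t) han]
    rw [window_sum]
    constructor <;> intro h <;> omega
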